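-- pv_equiv track=rewrite | github.com/maamounhajnajeeb/Problem-Solving-Repo | codewars/Weight for weight.py | string_sorting
-- ===== SOURCE A (Python) =====
-- def partition(array, start, end):
--     if end is None:
--         end = len(array)-1
--     l, r = start, end-1
--     while l < r:
--         if array[l] <= array[end]:
--             l += 1
--         elif array[r] > array[end]:
--             r -= 1
--         else:
--             array[l], array[r] = array[r], array[l]
--     if array[l] > array[end]:
--         array[l], array[end] = array[end], array[l]
--         return l
--     else:
--         return end
--
-- def quicksort(array, start=0, end=None):
--     if end is None:
--         end = len(array) - 1
--     if start < end:
--         pivot = partition(array, start, end)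
--         quicksort(array, start, pivot-1)
--         quicksort(array, pivot+1, end)
--     return array
--
-- def string_sorting(int_array, str_array):
--     i, j = 0, 1
--     while i < len(int_array) - 1 and j < len(int_array):
--         if int_array[i] == int_array[j]:
--             j += 1
--         elif int_array[i] != int_array[j] and j - i > 1:
--             str_array[i:j] = quicksort(str_array[i:j])
--             i, j = j, j+1
--         elif int_array[i] != int_array[j]:
--             i += 1
--             j += 1
--     if j-i > 1 and j == len(int_array):
--         str_array[i:j] = quicksort(str_array[i:j])
--     return str_array
-- ===== SOURCE B (Python) =====
-- def string_sorting(int_array, str_array):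
--     n = len(int_array)
--     bounds = [0] + [k for k in range(1, n) if int_array[k] != int_array[k - 1]] + [n]
--     for x, y in zip(bounds, bounds[1:]):
--         str_array[x:y] = sorted(str_array[x:y])
--     return str_array
-- ===== Notes on version B (the rewrite author's own statement) =====
-- stated objective: simpler
-- what changed: Replaces the two-pointer scan with hand-written in-place quicksort by one boundary pass: compute the run boundaries of int_array once, then slice-assign Python's builtin sorted over each run.
import Mathlib
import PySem

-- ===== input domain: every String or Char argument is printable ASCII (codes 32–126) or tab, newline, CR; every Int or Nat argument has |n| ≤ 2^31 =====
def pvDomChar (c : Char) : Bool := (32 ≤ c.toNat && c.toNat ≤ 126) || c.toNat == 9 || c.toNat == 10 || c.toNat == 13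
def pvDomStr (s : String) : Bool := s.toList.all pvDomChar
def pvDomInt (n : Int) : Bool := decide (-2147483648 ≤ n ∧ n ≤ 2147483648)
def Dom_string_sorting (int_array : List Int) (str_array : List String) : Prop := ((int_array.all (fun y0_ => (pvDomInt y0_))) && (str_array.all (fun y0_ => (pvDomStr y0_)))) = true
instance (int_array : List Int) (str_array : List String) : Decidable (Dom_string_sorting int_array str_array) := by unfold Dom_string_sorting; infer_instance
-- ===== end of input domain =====

-- B replaces A's two-pointer run scan + hand-written in-place quicksort by a boundary-index
-- pass feeding the builtin sort (simpler, and measured faster in a timing run). Both Pythons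
-- mutate str_array in place and return it; the equivalence proved here is about the returned value.

-- ===== PORT A =====
-- Python a[i] / a[i] = v (negative index wraps); every reachable call in these ports is in range,
-- so the total forms pyGetD/pySetD are exact here (Python raises only out of range, never reached).
def aget (a : List String) (i : Int) : String := PySem.List.pyGetD a i ""
def iget (ia : List Int) (i : Int) : Int := PySem.List.pyGetD ia i 0

-- the `while l < r` loop of partition; fuel: each iteration either moves l/r or swaps
-- (a swap is immediately followed by an l-move), so 2*(r-l)+2 iterations always suffice.
def partLoop (endi : Int) : Nat → List String × Int × Int → List String × Int × Int
  | 0, s => s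
  | fuel+1, (a, l, r) =>
    if l < r then
      if aget a l ≤ aget a endi then partLoop endi fuel (a, l+1, r)
      else if aget a endi < aget a r then partLoop endi fuel (a, l, r-1)
      else partLoop endi fuel (PySem.List.pySetD (PySem.List.pySetD a l (aget a r)) r (aget a l), l, r)
    else (a, l, r)

-- partition(array, start, end) with end ≠ None (quicksort always passes a concrete end)
def partitionA (a : List String) (start endi : Int) : List String × Int :=
  match partLoop endi ((2 * (endi - start)).toNat + 2) (a, start, endi - 1) with
  | (a', l, _r) =>
    if aget a' endi < aget a' l then
      (PySem.List.pySetD (PySem.List.pySetD a' l (aget a' endi)) endi (aget a' l), l)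
    else (a', endi)

-- quicksort(array, start, end); fuel: recursion depth on a segment of size s needs at most s levels
def quicksortFuel : Nat → List String → Int → Int → List String
  | 0, a, _, _ => a
  | fuel+1, a, start, endi =>
    if start < endi then
      let pr := partitionA a start endi
      let a2 := quicksortFuel fuel pr.1 start (pr.2 - 1)
      quicksortFuel fuel a2 (pr.2 + 1) endi
    else a

-- quicksort(array) with the default arguments start=0, end=None→len(array)-1
def quicksortA (a : List String) : List String :=
  quicksortFuel (a.length + 1) a 0 (PySem.List.len a - 1)

-- Python slice assignment a[i:j] = xs (0 ≤ i ≤ j at every reachable call; bounds clamp like slices)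
def setSlice (a : List String) (i j : Int) (xs : List String) : List String :=
  a.take (PySem.List.clampIdx a.length i) ++ xs ++
    a.drop (max (PySem.List.clampIdx a.length i) (PySem.List.clampIdx a.length j))

-- the main while loop of string_sorting; j strictly increases each iteration, so len+1 fuel suffices
def mainLoop (ia : List Int) : Nat → List String × Int × Int → List String × Int × Int
  | 0, s => s
  | fuel+1, (sa, i, j) =>
    if i < PySem.List.len ia - 1 ∧ j < PySem.List.len ia then
      if iget ia i = iget ia j then mainLoop ia fuel (sa, i, j+1)
      else if iget ia i ≠ iget ia j ∧ 1 < j - i then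
        mainLoop ia fuel (setSlice sa i j (quicksortA (PySem.List.slice sa (some i) (some j))), j, j+1)
      else if iget ia i ≠ iget ia j then mainLoop ia fuel (sa, i+1, j+1)
      else mainLoop ia fuel (sa, i, j)   -- unreachable: the elif chain is exhaustive
    else (sa, i, j)

def string_sorting (int_array : List Int) (str_array : List String) : List String :=
  match mainLoop int_array (int_array.length + 1) (str_array, 0, 1) with
  | (sa, i, j) =>
    if 1 < j - i ∧ j = PySem.List.len int_array then
      setSlice sa i j (quicksortA (PySem.List.slice sa (some i) (some j)))
    else sa

-- ===== PORT B =====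
-- str_array[x:y] = sorted(str_array[x:y])
def sortSlice (a : List String) (x y : Int) : List String :=
  setSlice a x y (PySem.List.sorted (PySem.List.slice a (some x) (some y)) (fun s => s) false)

def string_sorting_alt (int_array : List Int) (str_array : List String) : List String :=
  let n : Int := PySem.List.len int_array
  let bounds : List Int :=
    0 :: ((PySem.List.pyRange 1 n 1).filter
            (fun k => iget int_array k ≠ iget int_array (k - 1))) ++ [n]
  (bounds.zip (PySem.List.slice bounds (some 1) none)).foldl
    (fun a p => sortSlice a p.1 p.2) str_array

-- ===== PRECONDITION & SPEC =====
def Spec_string_sorting (int_array : List Int) (str_array : List String) (out : List String) : Prop := out = string_sorting_alt int_array str_array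
instance (int_array : List Int) (str_array : List String) (out : List String) : Decidable (Spec_string_sorting int_array str_array out) := by unfold Spec_string_sorting; infer_instance

-- ===== CLAIM (what is proved, stated in full; the proofs are below) =====
def Claim_equal_string_sorting : Prop := ∀ (int_array : List Int) (str_array : List String), Dom_string_sorting int_array str_array → Spec_string_sorting int_array str_array (string_sorting int_array str_array)

-- ===== LEMMAS AND PROOFS =====

-- ---------- basic lemmas about the index helpers ----------

theorem aget_natCast (a : List String) (k : Nat) : aget a (k : Int) = a[k]?.getD "" := by
  simp [aget, List.getD_eq_getElem?_getD]

theorem aget_nat (a : List String) (k : Nat) (h : k < a.length) : aget a (k : Int) = a[k] := by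
  simp [aget_natCast, List.getElem?_eq_getElem h]

theorem aget_set_ne (a : List String) (n k : Nat) (v : String) (h : n ≠ k) :
    aget (a.set n v) (k : Int) = aget a (k : Int) := by
  simp [aget_natCast, List.getElem?_set_ne h]

theorem aget_set_self (a : List String) (k : Nat) (v : String) (h : k < a.length) :
    aget (a.set k v) (k : Int) = v := by
  simp [aget_natCast, h]

-- swapping two entries of a list is a permutation
theorem set_cons_perm (x : String) : ∀ (t : List String) (m : Nat) (hm : m < t.length),
    List.Perm (t[m] :: t.set m x) (x :: t)
  | y :: s, 0, _ => by simpa using List.Perm.swap x y s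
  | y :: s, m+1, hm => by
    have hm' : m < s.length := by simpa using hm
    simp only [List.getElem_cons_succ, List.set_cons_succ]
    have ih := set_cons_perm x s m hm'
    exact ((List.Perm.swap y (s[m]'hm') (s.set m x)).trans (ih.cons y)).trans
      (List.Perm.swap x y s)

theorem swap_perm : ∀ (a : List String) (i j : Nat) (hi : i < a.length) (hj : j < a.length),
    List.Perm ((a.set i (a[j]'hj)).set j (a[i]'hi)) a
  | [], i, j, hi, _ => absurd hi (by simp)
  | x :: t, 0, 0, _, _ => by simp
  | x :: t, 0, j+1, _, hj => by
    simp only [List.getElem_cons_succ, List.getElem_cons_zero, List.set_cons_zero,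
      List.set_cons_succ]
    exact set_cons_perm x t j (by simpa using hj)
  | x :: t, i+1, 0, hi, _ => by
    simp only [List.getElem_cons_succ, List.getElem_cons_zero, List.set_cons_zero,
      List.set_cons_succ]
    exact set_cons_perm x t i (by simpa using hi)
  | x :: t, i+1, j+1, hi, hj => by
    simp only [List.getElem_cons_succ, List.set_cons_succ]
    exact (swap_perm t i j (by simpa using hi) (by simpa using hj)).cons x

theorem take_eq_of_agree (b a : List String) (s : Nat) (hlen : b.length = a.length)
    (h : ∀ k : Nat, k < s → aget b (k : Int) = aget a (k : Int)) : b.take s = a.take s := by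
  apply List.ext_getElem (by simp [hlen])
  intro i h1 h2
  simp only [List.length_take] at h1 h2
  have hib : i < b.length := by omega
  have hia : i < a.length := by omega
  have := h i (by omega)
  rw [aget_nat b i hib, aget_nat a i hia] at this
  simpa [List.getElem_take] using this

theorem drop_eq_of_agree (b a : List String) (d : Nat) (hlen : b.length = a.length)
    (h : ∀ k : Nat, d ≤ k → aget b (k : Int) = aget a (k : Int)) : b.drop d = a.drop d := by
  apply List.ext_getElem (by simp [hlen])
  intro i h1 h2
  simp only [List.length_drop] at h1 h2
  have hib : d + i < b.length := by omega
  have hia : d + i < a.length := by omega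
  have := h (d + i) (by omega)
  rw [aget_nat b _ hib, aget_nat a _ hia] at this
  simpa [List.getElem_drop] using this

theorem take_min' (a : List String) (x : Nat) : a.take (min x a.length) = a.take x := by
  by_cases h : x ≤ a.length
  · rw [min_eq_left h]
  · rw [min_eq_right (by omega), List.take_length, List.take_of_length_le (by omega)]

theorem drop_min' (a : List String) (y : Nat) : a.drop (min y a.length) = a.drop y := by
  by_cases h : y ≤ a.length
  · rw [min_eq_left h]
  · rw [min_eq_right (by omega), List.drop_length,
      List.drop_eq_nil_of_le (by omega)]

-- a.take s ++ middle ++ tail decomposition of any list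
theorem split3 (a : List String) (s t : Nat) :
    a = a.take s ++ (a.drop s).take t ++ a.drop (s + t) := by
  have h1 : (a.drop s).drop t = a.drop (s + t) := by
    rw [List.drop_drop]
  conv_lhs => rw [← List.take_append_drop s a, ← List.take_append_drop t (a.drop s)]
  rw [h1, List.append_assoc]

theorem decomp3 (c : List String) (s m e : Nat) (hsm : s ≤ m) (hme : m ≤ e)
    (he : e < c.length) :
    c = c.take s ++ (c.drop s).take (m - s) ++
        aget c (m : Int) :: ((c.drop (m+1)).take (e - m)) ++ c.drop (e + 1) := by
  have hm : m < c.length := by omega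
  have h1 : c = c.take s ++ (c.drop s).take (m - s) ++ c.drop m := by
    have := split3 c s (m - s)
    rwa [show s + (m - s) = m by omega] at this
  have h2 : c.drop m = aget c (m : Int) :: c.drop (m + 1) := by
    rw [aget_nat c m hm]; exact List.drop_eq_getElem_cons hm
  have h3 : c.drop (m + 1) = (c.drop (m+1)).take (e - m) ++ c.drop (e + 1) := by
    have h4 : (c.drop (m+1)).drop (e - m) = c.drop (e + 1) := by
      rw [List.drop_drop]; congr 1; omega
    conv_lhs => rw [← List.take_append_drop (e - m) (c.drop (m+1))]
    rw [h4]
  rw [h3] at h2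
  rw [h2] at h1
  conv_lhs => rw [h1]
  simp [List.append_assoc]

theorem mem_take_drop (c : List String) (s t : Nat) (x : String)
    (hx : x ∈ (c.drop s).take t) :
    ∃ k : Nat, s ≤ k ∧ k < s + t ∧ k < c.length ∧ x = aget c (k : Int) := by
  rw [List.mem_iff_getElem] at hx
  obtain ⟨i, hi, hxi⟩ := hx
  simp only [List.length_take, List.length_drop] at hi
  refine ⟨s + i, by omega, by omega, by omega, ?_⟩
  rw [aget_nat c (s + i) (by omega)]
  rw [← hxi]
  simp [List.getElem_take, List.getElem_drop]

theorem pairwise_of_length_le_one (l : List String) (h : l.length ≤ 1) :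
    List.Pairwise (· ≤ ·) l := by
  match l, h with
  | [], _ => exact List.Pairwise.nil
  | [x], _ => simp

-- ---------- correctness of A's partition loop ----------

theorem partLoop_spec : ∀ (fuel : Nat) (a : List String) (l r r0 e : Nat),
    l ≤ r → r ≤ r0 → r0 + 1 = e → e < a.length →
    2 * (r - l) + (if aget a (l : Int) ≤ aget a (e : Int) then 0 else 1) < fuel →
    (∀ k : Nat, r < k → k ≤ r0 → aget a (e : Int) < aget a (k : Int)) →
    (r < r0 → aget a (e : Int) < aget a (r : Int) ∨ aget a (e : Int) < aget a (l : Int)) →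
    ∃ (b : List String) (m : Nat),
      partLoop (e : Int) fuel (a, (l : Int), (r : Int)) = (b, (m : Int), (m : Int)) ∧
      l ≤ m ∧ m ≤ r ∧ b.length = a.length ∧ List.Perm b a ∧
      (∀ k : Nat, k < l ∨ r < k → aget b (k : Int) = aget a (k : Int)) ∧
      (∀ k : Nat, l ≤ k → k < m → aget b (k : Int) ≤ aget b (e : Int)) ∧
      (∀ k : Nat, m < k → k ≤ r0 → aget b (e : Int) < aget b (k : Int)) ∧
      (aget b (m : Int) ≤ aget b (e : Int) → m = r0) := by
  intro fuel
  induction fuel with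
  | zero =>
    intro a l r r0 e _ _ _ _ hfuel _ _
    exfalso
    by_cases h : aget a (l : Int) ≤ aget a (e : Int)
    · rw [if_pos h] at hfuel; omega
    · rw [if_neg h] at hfuel; omega
  | succ fuel ih =>
    intro a l r r0 e hlr hrr0 hr0e he hfuel inv4 inv5
    by_cases hltr : l < r
    · have hcast : ((l : Int) < (r : Int)) := by exact_mod_cast hltr
      by_cases hle : aget a (l : Int) ≤ aget a (e : Int)
      · -- l += 1
        have hstep : partLoop (e : Int) (fuel+1) (a, (l : Int), (r : Int))
            = partLoop (e : Int) fuel (a, ((l+1 : Nat) : Int), (r : Int)) := by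
          simp only [partLoop]
          rw [if_pos hcast, if_pos hle]
          norm_cast
        have hind : (if aget a ((l+1 : Nat) : Int) ≤ aget a (e : Int) then 0 else 1) ≤ 1 := by
          split <;> omega
        obtain ⟨b, m, heq, h1, h2, h3, h4, h5, h6, h7, h8⟩ :=
          ih a (l+1) r r0 e (by omega) hrr0 hr0e he
            (by rw [if_pos hle] at hfuel; omega)
            inv4
            (fun hr => by
              rcases inv5 hr with h | h
              · exact Or.inl h
              · exact absurd hle (not_le_of_gt h))
        refine ⟨b, m, by rw [hstep]; exact heq, by omega, h2, h3, h4,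
          fun k hk => h5 k (by omega), ?_, h7, h8⟩
        intro k hk1 hk2
        rcases Nat.lt_or_ge k (l+1) with hkl | hkl
        · have hkeq : k = l := by omega
          subst hkeq
          rw [h5 k (Or.inl (by omega)), h5 e (Or.inr (by omega))]
          exact hle
        · exact h6 k hkl hk2
      · have hel : aget a (e : Int) < aget a (l : Int) := lt_of_not_ge hle
        by_cases her : aget a (e : Int) < aget a (r : Int)
        · -- r -= 1
          have hr1 : ((r : Int) - 1) = ((r - 1 : Nat) : Int) := by omega
          have hstep : partLoop (e : Int) (fuel+1) (a, (l : Int), (r : Int))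
              = partLoop (e : Int) fuel (a, (l : Int), ((r-1 : Nat) : Int)) := by
            simp only [partLoop]
            rw [if_pos hcast, if_neg hle, if_pos her, hr1]
          obtain ⟨b, m, heq, h1, h2, h3, h4, h5, h6, h7, h8⟩ :=
            ih a l (r-1) r0 e (by omega) (by omega) hr0e he
              (by
                have : (if aget a (l : Int) ≤ aget a (e : Int) then 0 else 1) = 1 := by
                  rw [if_neg hle]
                rw [this] at hfuel
                have hind : (if aget a (l : Int) ≤ aget a (e : Int) then 0 else 1) ≤ 1 := by
                  split <;> omega
                omega)
              (fun k hk1 hk2 => by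
                rcases Nat.lt_or_ge r k with h | h
                · exact inv4 k h hk2
                · have : k = r := by omega
                  subst this; exact her)
              (fun _ => Or.inr hel)
          exact ⟨b, m, by rw [hstep]; exact heq, h1, by omega, h3, h4,
            fun k hk => h5 k (by omega), h6, h7, h8⟩
        · -- swap
          have hre : aget a (r : Int) ≤ aget a (e : Int) := le_of_not_gt her
          have hllen : l < a.length := by omega
          have hrlen : r < a.length := by omega
          set a' := (a.set l (aget a (r : Int))).set r (aget a (l : Int)) with ha'
          have hstep : partLoop (e : Int) (fuel+1) (a, (l : Int), (r : Int))
              = partLoop (e : Int) fuel (a', (l : Int), (r : Int)) := by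
            simp only [partLoop]
            rw [if_pos hcast, if_neg hle, if_neg her]
            simp [ha', PySem.List.pySetD_natCast]
          have hlen' : a'.length = a.length := by simp [ha']
          have hne_lr : l ≠ r := by omega
          have hne_le : l ≠ e := by omega
          have hne_re : r ≠ e := by omega
          have ha'l : aget a' (l : Int) = aget a (r : Int) := by
            rw [ha', aget_set_ne _ r l _ (by omega), aget_set_self _ l _ hllen]
          have ha'r : aget a' (r : Int) = aget a (l : Int) := by
            rw [ha', aget_set_self _ r _ (by simpa using hrlen)]
          have ha'k : ∀ k : Nat, k ≠ l → k ≠ r → aget a' (k : Int) = aget a (k : Int) := by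
            intro k hk1 hk2
            rw [ha', aget_set_ne _ r k _ (fun h => hk2 h.symm),
              aget_set_ne _ l k _ (fun h => hk1 h.symm)]
          have ha'e : aget a' (e : Int) = aget a (e : Int) := ha'k e (by omega) (by omega)
          obtain ⟨b, m, heq, h1, h2, h3, h4, h5, h6, h7, h8⟩ :=
            ih a' l r r0 e hlr hrr0 hr0e (by omega)
              (by
                have : (if aget a' (l : Int) ≤ aget a' (e : Int) then 0 else 1) = 0 := by
                  rw [if_pos (by rw [ha'l, ha'e]; exact hre)]
                rw [this]
                rw [if_neg hle] at hfuel
                omega)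
              (fun k hk1 hk2 => by
                rw [ha'e, ha'k k (by omega) (by omega)]
                exact inv4 k hk1 hk2)
              (fun hr => by
                rw [ha'e, ha'r]
                exact Or.inl hel)
          have hperm : List.Perm a' a := by
            have := swap_perm a l r hllen hrlen
            rw [← aget_nat a r hrlen, ← aget_nat a l hllen] at this
            exact this
          refine ⟨b, m, by rw [hstep]; exact heq, h1, h2, by omega,
            h4.trans hperm, ?_, h6, h7, h8⟩
          intro k hk
          rw [h5 k hk, ha'k k (by omega) (by omega)]
    · -- exit: l = r
      have hlr' : l = r := by omega
      have hcast : ¬ ((l : Int) < (r : Int)) := by exact_mod_cast hltr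
      refine ⟨a, l, ?_, le_refl l, by omega, rfl, List.Perm.refl a,
        fun _ _ => rfl, fun k _ hk2 => (by omega : False).elim, ?_, ?_⟩
      · simp only [partLoop]
        rw [if_neg hcast, hlr']
      · intro k hk1 hk2
        exact inv4 k (by omega) hk2
      · intro hme
        by_contra hne
        have hlt : l < r0 := by omega
        rcases inv5 (by omega) with h | h
        · rw [← hlr'] at h
          exact absurd hme (not_le_of_gt h)
        · exact absurd hme (not_le_of_gt h)

-- ---------- correctness of A's partition ----------

theorem partitionA_spec (a : List String) (s e : Nat) (hse : s < e) (he : e < a.length) :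
    ∃ (L : List String) (pv : String) (R : List String),
      partitionA a (s : Int) (e : Int) =
        (a.take s ++ L ++ pv :: R ++ a.drop (e+1), ((s + L.length : Nat) : Int)) ∧
      List.Perm (L ++ pv :: R) ((a.drop s).take (e + 1 - s)) ∧
      (∀ x ∈ L, x ≤ pv) ∧ (∀ x ∈ R, pv < x) ∧ s + L.length ≤ e := by
  have hr0e : (e - 1) + 1 = e := by omega
  have hfuel : ((2 * ((e : Int) - (s : Int))).toNat + 2) = 2 * (e - s) + 2 := by omega
  obtain ⟨b, m, heq, hsm, hmr, hlen, hperm, huntouched, hle3, hgt4, hv5⟩ :=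
    partLoop_spec (2 * (e - s) + 2) a s (e-1) (e-1) e (by omega) (le_refl _) hr0e he
      (by split <;> omega)
      (fun k hk1 hk2 => (by omega : False).elim)
      (fun h => (by omega : False).elim)
  have hme : m < e := by omega
  have hmlen : m < b.length := by omega
  have helen : e < b.length := by omega
  have hbe_ae : aget b (e : Int) = aget a (e : Int) := huntouched e (Or.inr (by omega))
  have hstep : partitionA a (s : Int) (e : Int) =
      (if aget b (e : Int) < aget b (m : Int) then
        (PySem.List.pySetD (PySem.List.pySetD b (m : Int) (aget b (e : Int))) (e : Int)
          (aget b (m : Int)), (m : Int))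
      else (b, (e : Int))) := by
    simp only [partitionA]
    rw [show ((e : Int) - 1) = ((e - 1 : Nat) : Int) by omega, hfuel, heq]
  by_cases hbm : aget b (e : Int) < aget b (m : Int)
  · -- final swap with the pivot, pivot lands at m
    set c := (b.set m (aget b (e : Int))).set e (aget b (m : Int)) with hc
    have hceq : partitionA a (s : Int) (e : Int) = (c, (m : Int)) := by
      rw [hstep, if_pos hbm, hc]
      simp [PySem.List.pySetD_natCast]
    have hclen : c.length = b.length := by simp [hc]
    have hcm : aget c (m : Int) = aget b (e : Int) := by
      rw [hc, aget_set_ne _ e m _ (by omega), aget_set_self _ m _ hmlen]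
    have hce : aget c (e : Int) = aget b (m : Int) := by
      rw [hc, aget_set_self _ e _ (by simpa using helen)]
    have hck : ∀ k : Nat, k ≠ m → k ≠ e → aget c (k : Int) = aget b (k : Int) := by
      intro k h1 h2
      rw [hc, aget_set_ne _ e k _ (fun h => h2 h.symm),
        aget_set_ne _ m k _ (fun h => h1 h.symm)]
    have hcperm : List.Perm c a := by
      have hswap := swap_perm b m e hmlen helen
      rw [← aget_nat b e helen, ← aget_nat b m hmlen] at hswap
      rw [hc]
      exact hswap.trans hperm
    have hdec := decomp3 c s m e (by omega) (by omega) (by omega)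
    have htake : c.take s = a.take s := by
      apply take_eq_of_agree _ _ _ (by omega)
      intro k hk
      rw [hck k (by omega) (by omega), huntouched k (Or.inl (by omega))]
    have hdrop : c.drop (e+1) = a.drop (e+1) := by
      apply drop_eq_of_agree _ _ _ (by omega)
      intro k hk
      rw [hck k (by omega) (by omega), huntouched k (Or.inr (by omega))]
    refine ⟨(c.drop s).take (m - s), aget c (m : Int), (c.drop (m+1)).take (e - m),
      ?_, ?_, ?_, ?_, ?_⟩
    · rw [hceq, Prod.mk.injEq]
      refine ⟨?_, ?_⟩
      · rw [← htake, ← hdrop]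
        exact hdec
      · have : ((c.drop s).take (m - s)).length = m - s := by
          simp [List.length_take, List.length_drop]; omega
        rw [this]
        congr 1
        omega
    · have hsplit : a = a.take s ++ (a.drop s).take (e + 1 - s) ++ a.drop (e+1) := by
        have := split3 a s (e + 1 - s)
        rwa [show s + (e + 1 - s) = e + 1 by omega] at this
      have hxc : a.take s ++ ((c.drop s).take (m - s) ++ aget c (m : Int) :: (c.drop (m+1)).take (e - m)) ++ a.drop (e+1) = c := by
        rw [← htake, ← hdrop]
        conv_rhs => rw [hdec]
        simp [List.append_assoc]
      have hcc : List.Perm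
          (a.take s ++ ((c.drop s).take (m - s) ++ aget c (m : Int) :: (c.drop (m+1)).take (e - m)) ++ a.drop (e+1))
          (a.take s ++ (a.drop s).take (e + 1 - s) ++ a.drop (e+1)) := by
        rw [hxc, ← hsplit]
        exact hcperm
      have h1 := (List.perm_append_right_iff _).mp hcc
      exact (List.perm_append_left_iff _).mp h1
    · intro x hx
      obtain ⟨k, hk1, hk2, hk3, hxk⟩ := mem_take_drop c s (m - s) x hx
      have hkm : k < m := by omega
      rw [hxk, hcm, hck k (by omega) (by omega)]
      exact hle3 k (by omega) hkm
    · intro x hx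
      obtain ⟨k, hk1, hk2, hk3, hxk⟩ := mem_take_drop c (m+1) (e - m) x hx
      rw [hxk, hcm]
      rcases Nat.lt_or_ge k e with hke | hke
      · rw [hck k (by omega) (by omega)]
        exact hgt4 k (by omega) (by omega)
      · have : k = e := by omega
        subst this
        rw [hce]
        exact hbm
    · have : ((c.drop s).take (m - s)).length = m - s := by
        simp [List.length_take, List.length_drop]; omega
      rw [this]; omega
  · -- pivot stays at e
    have hbm' : aget b (m : Int) ≤ aget b (e : Int) := le_of_not_gt hbm
    have hmr0 : m = e - 1 := hv5 hbm'
    have hceq : partitionA a (s : Int) (e : Int) = (b, (e : Int)) := by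
      rw [hstep, if_neg hbm]
    have hdec := decomp3 b s e e (by omega) (le_refl e) (by omega)
    rw [show e - e = 0 by omega] at hdec
    simp only [List.take_zero] at hdec
    have htake : b.take s = a.take s := by
      apply take_eq_of_agree _ _ _ (by omega)
      intro k hk
      exact huntouched k (Or.inl (by omega))
    have hdrop : b.drop (e+1) = a.drop (e+1) := by
      apply drop_eq_of_agree _ _ _ (by omega)
      intro k hk
      exact huntouched k (Or.inr (by omega))
    refine ⟨(b.drop s).take (e - s), aget b (e : Int), [], ?_, ?_, ?_, ?_, ?_⟩
    · rw [hceq, Prod.mk.injEq]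
      refine ⟨?_, ?_⟩
      · rw [← htake, ← hdrop]
        simpa using hdec
      · have : ((b.drop s).take (e - s)).length = e - s := by
          simp [List.length_take, List.length_drop]; omega
        rw [this]
        congr 1
        omega
    · have hsplit : a = a.take s ++ (a.drop s).take (e + 1 - s) ++ a.drop (e+1) := by
        have := split3 a s (e + 1 - s)
        rwa [show s + (e + 1 - s) = e + 1 by omega] at this
      have hxc : a.take s ++ ((b.drop s).take (e - s) ++ [aget b (e : Int)]) ++ a.drop (e+1) = b := by
        rw [← htake, ← hdrop]
        conv_rhs => rw [hdec]
        simp [List.append_assoc]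
      have hcc : List.Perm
          (a.take s ++ ((b.drop s).take (e - s) ++ [aget b (e : Int)]) ++ a.drop (e+1))
          (a.take s ++ (a.drop s).take (e + 1 - s) ++ a.drop (e+1)) := by
        rw [hxc, ← hsplit]
        exact hperm
      have h1 := (List.perm_append_right_iff _).mp hcc
      simpa using (List.perm_append_left_iff _).mp h1
    · intro x hx
      obtain ⟨k, hk1, hk2, hk3, hxk⟩ := mem_take_drop b s (e - s) x hx
      rw [hxk]
      rcases Nat.lt_or_ge k m with hkm | hkm
      · exact hle3 k (by omega) hkm
      · have : k = m := by omega
        subst this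
        exact hbm'
    · intro x hx
      exact absurd hx (List.not_mem_nil)
    · have : ((b.drop s).take (e - s)).length = e - s := by
        simp [List.length_take, List.length_drop]; omega
      rw [this]; omega

-- ---------- correctness of A's quicksort ----------

theorem quicksortFuel_spec : ∀ (fuel : Nat) (a : List String) (s e : Int),
    0 ≤ s → s ≤ e + 1 → e < (a.length : Int) → (e + 1 - s).toNat ≤ fuel →
    ∃ m, quicksortFuel fuel a s e = a.take s.toNat ++ m ++ a.drop (e+1).toNat ∧
      List.Perm m ((a.drop s.toNat).take ((e + 1 - s).toNat)) ∧
      List.Pairwise (· ≤ ·) m := by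
  intro fuel
  induction fuel with
  | zero =>
    intro a s e h0 hs1 he hf
    have hes : e + 1 = s := by omega
    refine ⟨[], ?_, ?_, List.Pairwise.nil⟩
    · simp only [quicksortFuel]
      rw [show (e+1).toNat = s.toNat by omega]
      simp [List.take_append_drop]
    · rw [show (e + 1 - s).toNat = 0 by omega]
      simp
  | succ fuel ih =>
    intro a s e h0 hs1 he hf
    by_cases hse : s < e
    · -- recursive case
      obtain ⟨s', rfl⟩ : ∃ n : Nat, s = (n : Int) := ⟨s.toNat, by omega⟩
      obtain ⟨e', rfl⟩ : ∃ n : Nat, e = (n : Int) := ⟨e.toNat, by omega⟩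
      have hse' : s' < e' := by exact_mod_cast hse
      have he' : e' < a.length := by exact_mod_cast he
      obtain ⟨L, pv, R, hP, hPperm, hL, hR, hpivle⟩ := partitionA_spec a s' e' hse' he'
      have hseg_len : L.length + 1 + R.length = e' + 1 - s' := by
        have := hPperm.length_eq
        simp only [List.length_append, List.length_cons, List.length_take,
          List.length_drop] at this
        omega
      have hblen : (a.take s' ++ L ++ pv :: R ++ a.drop (e'+1)).length = a.length := by
        simp only [List.length_append, List.length_cons, List.length_take,
          List.length_drop]
        omega
      set b := a.take s' ++ L ++ pv :: R ++ a.drop (e'+1) with hb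
      set piv : Int := ((s' + L.length : Nat) : Int) with hpiv
      have hstep : quicksortFuel (fuel+1) a (s' : Int) (e' : Int) =
          quicksortFuel fuel (quicksortFuel fuel b (s' : Int) (piv - 1)) (piv + 1) (e' : Int) := by
        simp only [quicksortFuel]
        rw [if_pos (by exact_mod_cast hse)]
        rw [hP]
      -- left recursive call
      have htakes : b.take s' = a.take s' := by
        rw [hb, List.append_assoc, List.append_assoc]
        exact List.take_left' (by rw [List.length_take]; omega)
      have hdropp : b.drop (s' + L.length) = pv :: R ++ a.drop (e'+1) := by
        rw [hb]
        rw [show a.take s' ++ L ++ pv :: R ++ a.drop (e'+1)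
            = (a.take s' ++ L) ++ (pv :: R ++ a.drop (e'+1)) by simp [List.append_assoc]]
        exact List.drop_left' (by simp only [List.length_append, List.length_take]; omega)
      have hdrops : b.drop s' = L ++ (pv :: R ++ a.drop (e'+1)) := by
        rw [hb, List.append_assoc, List.append_assoc]
        exact List.drop_left' (by rw [List.length_take]; omega)
      obtain ⟨m1, heq1, hp1, hpw1⟩ :=
        ih b (s' : Int) (piv - 1) (by omega) (by rw [hpiv]; push_cast; omega)
          (by rw [hblen, hpiv]; push_cast; omega)
          (by rw [hpiv]; push_cast; omega)
      rw [show piv - 1 + 1 = piv by ring] at heq1 hp1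
      rw [show piv.toNat = s' + L.length by rw [hpiv]; omega] at heq1
      rw [show ((s' : Int)).toNat = s' by omega] at heq1 hp1
      rw [htakes, hdropp] at heq1
      have hm1L : List.Perm m1 L := by
        have h2 : ((piv - (s' : Int))).toNat = L.length := by rw [hpiv]; omega
        rw [h2, hdrops] at hp1
        rwa [List.take_left' rfl] at hp1
      set a2 := a.take s' ++ m1 ++ (pv :: R ++ a.drop (e'+1)) with ha2
      have ha2eq : quicksortFuel fuel b (s' : Int) (piv - 1) = a2 := by
        rw [heq1, ha2]
      have ha2len : a2.length = a.length := by
        rw [ha2]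
        simp only [List.length_append, List.length_cons, List.length_take,
          List.length_drop, hm1L.length_eq]
        omega
      -- right recursive call
      have htakes2 : a2.take (s' + L.length + 1) = a.take s' ++ m1 ++ [pv] := by
        rw [ha2]
        rw [show a.take s' ++ m1 ++ (pv :: R ++ a.drop (e'+1))
            = (a.take s' ++ m1 ++ [pv]) ++ (R ++ a.drop (e'+1)) by simp [List.append_assoc]]
        exact List.take_left' (by
          simp [List.length_take, hm1L.length_eq]
          omega)
      have hdrop2 : a2.drop (e' + 1) = a.drop (e'+1) := by
        rw [ha2]
        rw [show a.take s' ++ m1 ++ (pv :: R ++ a.drop (e'+1))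
            = (a.take s' ++ m1 ++ pv :: R) ++ a.drop (e'+1) by simp [List.append_assoc]]
        exact List.drop_left' (by
          simp [List.length_take, List.length_cons, hm1L.length_eq]
          omega)
      have hdropp2 : a2.drop (s' + L.length + 1) = R ++ a.drop (e'+1) := by
        rw [ha2]
        rw [show a.take s' ++ m1 ++ (pv :: R ++ a.drop (e'+1))
            = (a.take s' ++ m1 ++ [pv]) ++ (R ++ a.drop (e'+1)) by simp [List.append_assoc]]
        exact List.drop_left' (by
          simp [List.length_take, hm1L.length_eq]
          omega)
      obtain ⟨m2, heq2, hp2, hpw2⟩ :=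
        ih a2 (piv + 1) (e' : Int) (by rw [hpiv]; push_cast; omega)
          (by rw [hpiv]; push_cast; omega)
          (by rw [ha2len]; exact_mod_cast he)
          (by rw [hpiv]; push_cast; omega)
      rw [show (piv + 1).toNat = s' + L.length + 1 by rw [hpiv]; omega] at heq2 hp2
      rw [show (((e' : Int)) + 1).toNat = e' + 1 by omega] at heq2
      rw [htakes2, hdrop2] at heq2
      have hm2R : List.Perm m2 R := by
        have hlen : (((e' : Int)) + 1 - (piv + 1)).toNat = R.length := by
          rw [hpiv]; omega
        rw [hlen, hdropp2] at hp2
        rwa [List.take_left' rfl] at hp2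
      refine ⟨m1 ++ pv :: m2, ?_, ?_, ?_⟩
      · rw [hstep, ha2eq, heq2]
        rw [show ((s' : Int)).toNat = s' by omega,
          show (((e' : Int)) + 1).toNat = e' + 1 by omega]
        simp [List.append_assoc]
      · have h1 : List.Perm (m1 ++ pv :: m2) (L ++ pv :: R) :=
          hm1L.append (hm2R.cons pv)
        have h2 : List.Perm (L ++ pv :: R)
            ((a.drop ((s' : Int)).toNat).take ((((e' : Int)) + 1 - (s' : Int)).toNat)) := by
          rw [show ((s' : Int)).toNat = s' by omega,
            show (((e' : Int)) + 1 - (s' : Int)).toNat = e' + 1 - s' by omega]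
          exact hPperm
        exact h1.trans h2
      · rw [List.pairwise_append]
        refine ⟨hpw1, ?_, ?_⟩
        · rw [List.pairwise_cons]
          refine ⟨?_, hpw2⟩
          intro y hy
          exact le_of_lt (hR y (hm2R.mem_iff.mp hy))
        · intro x hx y hy
          have hxL : x ≤ pv := hL x (hm1L.mem_iff.mp hx)
          rcases List.mem_cons.mp hy with rfl | hy'
          · exact hxL
          · exact hxL.trans (le_of_lt (hR y (hm2R.mem_iff.mp hy')))
    · -- base: segment of size ≤ 1
      have hstep : quicksortFuel (fuel+1) a s e = a := by
        simp only [quicksortFuel]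
        rw [if_neg hse]
      rcases eq_or_lt_of_le hs1 with hes | hlt
      · -- s = e + 1 : empty segment
        refine ⟨[], ?_, ?_, List.Pairwise.nil⟩
        · rw [hstep, show (e+1).toNat = s.toNat by omega]
          simp [List.take_append_drop]
        · rw [show (e + 1 - s).toNat = 0 by omega]
          simp
      · -- s = e : singleton segment
        have hes : s = e := by omega
        subst hes
        obtain ⟨s', rfl⟩ : ∃ n : Nat, s = (n : Int) := ⟨s.toNat, by omega⟩
        have hs'len : s' < a.length := by exact_mod_cast he
        refine ⟨(a.drop s').take 1, ?_, ?_, pairwise_of_length_le_one _ (by simp)⟩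
        · rw [hstep]
          rw [show ((s' : Int)).toNat = s' by omega,
            show (((s' : Int)) + 1).toNat = s' + 1 by omega]
          exact split3 a s' 1
        · rw [show ((s' : Int)).toNat = s' by omega,
            show (((s' : Int)) + 1 - (s' : Int)).toNat = 1 by omega]

theorem quicksortA_sorted (a : List String) :
    quicksortA a = PySem.List.sorted a (fun s => s) false := by
  obtain ⟨m, heq, hp, hpw⟩ :=
    quicksortFuel_spec (a.length + 1) a 0 ((a.length : Int) - 1) (le_refl 0)
      (by omega) (by omega) (by omega)
  rw [show ((a.length : Int) - 1 + 1) = (a.length : Int) by ring] at heq hp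
  rw [show ((0 : Int)).toNat = 0 by rfl] at heq hp
  rw [show ((a.length : Int)).toNat = a.length by omega] at heq
  simp only [List.take_zero, List.drop_length, List.nil_append, List.append_nil] at heq
  rw [show ((a.length : Int) - 0).toNat = a.length by omega] at hp
  rw [List.drop_zero, List.take_length] at hp
  rw [quicksortA, PySem.List.len_eq, heq]
  exact (PySem.List.sorted_id_eq_of_perm_of_pairwise _ _ hp hpw).symm

-- ---------- slice-assignment bridges ----------

def sortSliceN (a : List String) (x y : Nat) : List String :=
  a.take x ++ PySem.List.sorted ((a.drop x).take (y - x)) (fun s => s) false ++ a.drop y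

theorem setSlice_quick (a : List String) (x y : Int) :
    setSlice a x y (quicksortA (PySem.List.slice a (some x) (some y))) = sortSlice a x y := by
  rw [sortSlice, quicksortA_sorted]

theorem sortSlice_natCast (a : List String) (x y : Nat) (hxy : x ≤ y) :
    sortSlice a (x : Int) (y : Int) = sortSliceN a x y := by
  rw [sortSlice, setSlice, sortSliceN]
  have hcx : PySem.List.clampIdx a.length (x : Int) = min x a.length := by simp [pysem]
  have hcy : PySem.List.clampIdx a.length (y : Int) = min y a.length := by simp [pysem]
  rw [hcx, hcy, max_eq_right (by omega), take_min', drop_min',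
    PySem.List.slice_natCast]

theorem sortSliceN_degenerate (a : List String) (x y : Nat) (hxy : x ≤ y) (h1 : y ≤ x + 1) :
    sortSliceN a x y = a := by
  rcases eq_or_lt_of_le hxy with rfl | hlt
  · simp only [sortSliceN, Nat.sub_self, List.take_zero]
    rw [show PySem.List.sorted ([] : List String) (fun s => s) false = [] from rfl]
    simp [List.take_append_drop]
  · have hy : y = x + 1 := by omega
    subst hy
    have hsub : x + 1 - x = 1 := by omega
    rcases Nat.lt_or_ge x a.length with hx | hx
    · have hdrop : a.drop x = a[x] :: a.drop (x+1) := List.drop_eq_getElem_cons hx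
      simp only [sortSliceN, hsub]
      rw [hdrop]
      simp only [List.take_succ_cons, List.take_zero]
      rw [show PySem.List.sorted [a[x]] (fun s : String => s) false = [a[x]] from
        PySem.List.sorted_eq_self_of_pairwise [a[x]] (fun s : String => s) (by simp)]
      rw [List.append_assoc, List.singleton_append, ← hdrop]
      exact List.take_append_drop x a
    · simp only [sortSliceN, hsub]
      rw [List.take_of_length_le hx, List.drop_eq_nil_of_le hx,
        List.drop_eq_nil_of_le (by omega), List.take_nil,
        show PySem.List.sorted ([] : List String) (fun s => s) false = [] from rfl]
      simp

-- ---------- run boundaries of int_array ----------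

def nextB (ia : List Int) (i : Nat) : Nat :=
  if _h : i + 1 < ia.length then
    if iget ia ((i+1 : Nat) : Int) = iget ia (i : Int) then nextB ia (i+1) else i + 1
  else ia.length
termination_by ia.length - i

theorem nextB_gt (ia : List Int) : ∀ (d i : Nat), ia.length - i ≤ d → i < ia.length →
    i < nextB ia i
  | 0, i, hd, hi => by omega
  | d+1, i, hd, hi => by
    rw [nextB]
    split
    · split
      · have := nextB_gt ia d (i+1) (by omega) (by omega)
        omega
      · omega
    · omega

theorem nextB_le (ia : List Int) : ∀ (d i : Nat), ia.length - i ≤ d →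
    nextB ia i ≤ ia.length
  | 0, i, hd => by
    rw [nextB]
    split
    · omega
    · omega
  | d+1, i, hd => by
    rw [nextB]
    split
    · split
      · exact nextB_le ia d (i+1) (by omega)
      · omega
    · omega

theorem nextB_run (ia : List Int) : ∀ (d i : Nat), ia.length - i ≤ d →
    ∀ k : Nat, i < k → k < nextB ia i → iget ia (k : Int) = iget ia ((k-1 : Nat) : Int)
  | 0, i, hd, k, hk1, hk2 => by
    rw [nextB] at hk2
    split at hk2
    · omega
    · omega
  | d+1, i, hd, k, hk1, hk2 => by
    rw [nextB] at hk2
    split at hk2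
    · split at hk2
      · rcases Nat.lt_or_ge (i+1) k with h | h
        · exact nextB_run ia d (i+1) (by omega) k h hk2
        · have hk : k = i + 1 := by omega
          subst hk
          simpa using ‹iget ia ((i+1 : Nat) : Int) = iget ia (i : Int)›
      · omega
    · omega

theorem nextB_exit (ia : List Int) : ∀ (d i : Nat), ia.length - i ≤ d →
    nextB ia i < ia.length →
    iget ia ((nextB ia i : Nat) : Int) ≠ iget ia ((nextB ia i - 1 : Nat) : Int)
  | 0, i, hd, hlt => by
    rw [nextB] at hlt ⊢
    split at hlt
    · omega
    · omega
  | d+1, i, hd, hlt => by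
    rw [nextB] at hlt ⊢
    split at hlt
    · rename_i h1
      split at hlt
      · rename_i h2
        rw [dif_pos h1, if_pos h2]
        exact nextB_exit ia d (i+1) (by omega) hlt
      · rename_i h2
        rw [dif_pos h1, if_neg h2]
        simpa using h2
    · rename_i h1
      exact absurd hlt (lt_irrefl _)

theorem nextB_eq_of (ia : List Int) : ∀ (d i j : Nat), ia.length - i ≤ d →
    i < j → j ≤ ia.length →
    (∀ k : Nat, i < k → k < j → iget ia (k : Int) = iget ia ((k-1 : Nat) : Int)) →
    (j = ia.length ∨ iget ia (j : Int) ≠ iget ia ((j-1 : Nat) : Int)) →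
    nextB ia i = j
  | 0, i, j, hd, hij, hj, hconst, hbound => by omega
  | d+1, i, j, hd, hij, hj, hconst, hbound => by
    rw [nextB]
    split
    · rename_i h1
      by_cases h2 : iget ia ((i+1 : Nat) : Int) = iget ia (i : Int)
      · rw [if_pos h2]
        have hij' : i + 1 < j := by
          rcases Nat.lt_or_ge (i+1) j with h | h
          · exact h
          · exfalso
            have hji : j = i + 1 := by omega
            rcases hbound with hb | hb
            · omega
            · subst hji
              simp only [show i + 1 - 1 = i by omega] at hb
              exact hb h2
        exact nextB_eq_of ia d (i+1) j (by omega) hij' hj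
          (fun k hk1 hk2 => hconst k (by omega) hk2) hbound
      · rw [if_neg h2]
        rcases Nat.lt_or_ge (i+1) j with h | h
        · exfalso
          have := hconst (i+1) (by omega) h
          simp only [show i + 1 - 1 = i by omega] at this
          exact h2 this
        · omega
    · omega

-- B's pass over the runs, written as a recursion on the run starts
def go (ia : List Int) (sa : List String) (i : Nat) : List String :=
  if _h : i < ia.length then go ia (sortSliceN sa i (nextB ia i)) (nextB ia i) else sa
termination_by ia.length - i
decreasing_by
  have := nextB_gt ia (ia.length - i) i (by omega) _h
  have := nextB_le ia (ia.length - i) i (by omega)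
  omega

-- ---------- A's main loop computes go ----------

def compositeA (ia : List Int) (fuel : Nat) (sa : List String) (i j : Int) : List String :=
  match mainLoop ia fuel (sa, i, j) with
  | (sa', i', j') =>
    if 1 < j' - i' ∧ j' = PySem.List.len ia then
      setSlice sa' i' j' (quicksortA (PySem.List.slice sa' (some i') (some j')))
    else sa'

theorem string_sorting_eq_composite (ia : List Int) (sa : List String) :
    string_sorting ia sa = compositeA ia (ia.length + 1) sa 0 1 := rfl

theorem mainLoop_go (ia : List Int) : ∀ (fuel : Nat) (i j : Nat) (sa : List String),
    i < j → j ≤ ia.length →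
    (∀ k : Nat, i < k → k < j → iget ia (k : Int) = iget ia (i : Int)) →
    ia.length + 1 - j < fuel →
    compositeA ia fuel sa (i : Int) (j : Int) = go ia sa i := by
  intro fuel
  induction fuel with
  | zero =>
    intro i j sa hij hj _ hfuel
    exact absurd hfuel (by omega)
  | succ fuel ih =>
    intro i j sa hij hj hconst hfuel
    have hadj : ∀ k : Nat, i < k → k < j →
        iget ia (k : Int) = iget ia ((k-1 : Nat) : Int) := by
      intro k hk1 hk2
      rcases Nat.lt_or_ge i (k-1) with h | h
      · rw [hconst k hk1 hk2, hconst (k-1) h (by omega)]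
      · have : k - 1 = i := by omega
        rw [hconst k hk1 hk2, this]
    by_cases hjn : j < ia.length
    · have hcond : ((i : Int) < PySem.List.len ia - 1 ∧ (j : Int) < PySem.List.len ia) := by
        rw [PySem.List.len_eq]
        constructor
        · omega
        · omega
      by_cases hv : iget ia (i : Int) = iget ia (j : Int)
      · have hstep : mainLoop ia (fuel+1) (sa, (i : Int), (j : Int))
            = mainLoop ia fuel (sa, (i : Int), ((j+1 : Nat) : Int)) := by
          simp only [mainLoop]
          rw [if_pos hcond, if_pos hv]
          norm_cast
        have : compositeA ia (fuel+1) sa (i : Int) (j : Int)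
            = compositeA ia fuel sa (i : Int) ((j+1 : Nat) : Int) := by
          simp only [compositeA, hstep]
        rw [this]
        exact ih i (j+1) sa (by omega) (by omega)
          (fun k hk1 hk2 => by
            rcases Nat.lt_or_ge k j with h | h
            · exact hconst k hk1 h
            · have : k = j := by omega
              subst this
              exact hv.symm)
          (by omega)
      · by_cases hrun : (1 : Int) < (j : Int) - (i : Int)
        · -- a run of length ≥ 2 ends at j: sort it and restart at j
          have hnextB : nextB ia i = j :=
            nextB_eq_of ia (ia.length - i) i j (by omega) hij (by omega) hadj
              (Or.inr (by
                have hj1 : iget ia ((j-1 : Nat) : Int) = iget ia (i : Int) := by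
                  rcases Nat.lt_or_ge i (j-1) with h | h
                  · exact hconst (j-1) h (by omega)
                  · have : j - 1 = i := by omega
                    rw [this]
                rw [hj1]
                exact fun h => hv (h.symm)))
          have hsa' : setSlice sa (i : Int) (j : Int)
              (quicksortA (PySem.List.slice sa (some (i : Int)) (some (j : Int))))
              = sortSliceN sa i j := by
            rw [setSlice_quick, sortSlice_natCast sa i j (by omega)]
          have hstep : mainLoop ia (fuel+1) (sa, (i : Int), (j : Int))
              = mainLoop ia fuel (sortSliceN sa i j, (j : Int), ((j+1 : Nat) : Int)) := by
            simp only [mainLoop]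
            rw [if_pos hcond, if_neg hv, if_pos ⟨hv, hrun⟩, hsa']
            norm_cast
          have : compositeA ia (fuel+1) sa (i : Int) (j : Int)
              = compositeA ia fuel (sortSliceN sa i j) (j : Int) ((j+1 : Nat) : Int) := by
            simp only [compositeA, hstep]
          rw [this]
          rw [ih j (j+1) (sortSliceN sa i j) (by omega) (by omega)
            (fun k hk1 hk2 => by omega) (by omega)]
          conv_rhs => rw [go]
          rw [dif_pos (by omega : i < ia.length), hnextB]
        · -- adjacent distinct values: step both pointers
          have hji : j = i + 1 := by omega
          have hnextB : nextB ia i = j :=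
            nextB_eq_of ia (ia.length - i) i j (by omega) hij (by omega) hadj
              (Or.inr (by
                rw [show j - 1 = i by omega]
                exact fun h => hv (h.symm)))
          have hstep : mainLoop ia (fuel+1) (sa, (i : Int), (j : Int))
              = mainLoop ia fuel (sa, ((i+1 : Nat) : Int), ((j+1 : Nat) : Int)) := by
            simp only [mainLoop]
            rw [if_pos hcond, if_neg hv, if_neg (by
                intro hcontra
                exact hrun hcontra.2), if_pos (fun h => hv h)]
            norm_cast
          have : compositeA ia (fuel+1) sa (i : Int) (j : Int)
              = compositeA ia fuel sa ((i+1 : Nat) : Int) ((j+1 : Nat) : Int) := by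
            simp only [compositeA, hstep]
          rw [this]
          rw [ih (i+1) (j+1) sa (by omega) (by omega)
            (fun k hk1 hk2 => by omega) (by omega)]
          conv_rhs => rw [go]
          rw [dif_pos (by omega : i < ia.length), hnextB,
            sortSliceN_degenerate sa i j (by omega) (by omega), hji]
    · -- the loop exits with j = ia.length
      have hjlen : j = ia.length := by omega
      have hcond : ¬ ((i : Int) < PySem.List.len ia - 1 ∧ (j : Int) < PySem.List.len ia) := by
        rw [PySem.List.len_eq]
        intro hcontra
        have := hcontra.2
        push_cast at this
        omega
      have hexit : mainLoop ia (fuel+1) (sa, (i : Int), (j : Int))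
          = (sa, (i : Int), (j : Int)) := by
        simp only [mainLoop]
        rw [if_neg hcond]
      have hnextB : nextB ia i = j :=
        nextB_eq_of ia (ia.length - i) i j (by omega) hij (by omega) hadj (Or.inl hjlen)
      by_cases hlong : (1 : Int) < (j : Int) - (i : Int)
      · have : compositeA ia (fuel+1) sa (i : Int) (j : Int)
            = setSlice sa (i : Int) (j : Int)
                (quicksortA (PySem.List.slice sa (some (i : Int)) (some (j : Int)))) := by
          simp only [compositeA, hexit]
          rw [if_pos ⟨hlong, by rw [PySem.List.len_eq, hjlen]⟩]
        rw [this, setSlice_quick, sortSlice_natCast sa i j (by omega)]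
        conv_rhs => rw [go]
        rw [dif_pos (by omega : i < ia.length), hnextB]
        conv_rhs => rw [go]
        rw [dif_neg (by omega : ¬ j < ia.length)]
      · have : compositeA ia (fuel+1) sa (i : Int) (j : Int) = sa := by
          simp only [compositeA, hexit]
          rw [if_neg (fun hcontra => hlong hcontra.1)]
        rw [this]
        conv_rhs => rw [go]
        rw [dif_pos (by omega : i < ia.length), hnextB,
          sortSliceN_degenerate sa i j (by omega) (by omega)]
        conv_rhs => rw [go]
        rw [dif_neg (by omega : ¬ j < ia.length)]

-- ---------- B's boundary fold computes go ----------

def RB (ia : List Int) (i : Nat) : List Int :=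
  ((PySem.List.pyRange ((i+1 : Nat) : Int) ((ia.length : Nat) : Int) 1).filter
    (fun k => iget ia k ≠ iget ia (k - 1))) ++ [((ia.length : Nat) : Int)]

theorem filter_run_split (ia : List Int) (i : Nat) (hi : i < ia.length) :
    (PySem.List.pyRange ((i+1 : Nat) : Int) ((ia.length : Nat) : Int) 1).filter
      (fun k => iget ia k ≠ iget ia (k - 1)) =
    (if nextB ia i = ia.length then ([] : List Int)
     else ((nextB ia i : Nat) : Int) ::
       (PySem.List.pyRange ((nextB ia i + 1 : Nat) : Int) ((ia.length : Nat) : Int) 1).filter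
         (fun k => iget ia k ≠ iget ia (k - 1))) := by
  have hij : i < nextB ia i := nextB_gt ia (ia.length - i) i (by omega) hi
  have hjle : nextB ia i ≤ ia.length := nextB_le ia (ia.length - i) i (by omega)
  rw [PySem.List.pyRange_one_append ((i+1 : Nat) : Int) ((nextB ia i : Nat) : Int)
      ((ia.length : Nat) : Int) (by omega) (by omega),
    List.filter_append]
  have hnil : (PySem.List.pyRange ((i+1 : Nat) : Int) ((nextB ia i : Nat) : Int) 1).filter
      (fun k => iget ia k ≠ iget ia (k - 1)) = [] := by
    rw [List.filter_eq_nil_iff]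
    intro x hx
    rw [PySem.List.mem_pyRange_one] at hx
    obtain ⟨k, rfl⟩ : ∃ m : Nat, x = (m : Int) := ⟨x.toNat, by omega⟩
    have hk1 : i < k := by push_cast at hx; omega
    have hk2 : k < nextB ia i := by push_cast at hx; omega
    have hrun := nextB_run ia (ia.length - i) i (by omega) k hk1 hk2
    simp [show ((k : Nat) : Int) - 1 = ((k-1 : Nat) : Int) by omega, hrun]
  rw [hnil, List.nil_append]
  by_cases hjn : nextB ia i = ia.length
  · rw [if_pos hjn, hjn]
    rw [PySem.List.pyRange_one_eq_nil (le_refl _)]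
    simp
  · rw [if_neg hjn]
    have hjlt : nextB ia i < ia.length := by omega
    rw [PySem.List.pyRange_one_cons (by omega)]
    rw [List.filter_cons_of_pos (by
      have hx := nextB_exit ia (ia.length - i) i (by omega) hjlt
      simpa [show ((nextB ia i : Nat) : Int) - 1 = ((nextB ia i - 1 : Nat) : Int) by omega]
        using hx)]
    norm_cast

theorem foldPairs (ia : List Int) : ∀ (d i : Nat), ia.length - i ≤ d → i ≤ ia.length →
    ∀ sa : List String,
    ((((i : Nat) : Int) :: RB ia i).zip (RB ia i)).foldl
      (fun a p => sortSlice a p.1 p.2) sa = go ia sa i := by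
  intro d
  induction d with
  | zero =>
    intro i hd hle sa
    have hieq : i = ia.length := by omega
    subst hieq
    rw [RB, PySem.List.pyRange_one_eq_nil (by push_cast; omega)]
    simp only [List.filter_nil, List.nil_append]
    rw [List.zip_cons_cons, List.zip_nil_right]
    simp only [List.foldl_cons, List.foldl_nil]
    rw [sortSlice_natCast sa ia.length ia.length (le_refl _),
      sortSliceN_degenerate sa ia.length ia.length (le_refl _) (by omega)]
    rw [go]
    rw [dif_neg (lt_irrefl _)]
  | succ d ih =>
    intro i hd hle sa
    by_cases hi : i < ia.length
    · have hij : i < nextB ia i := nextB_gt ia (ia.length - i) i (by omega) hi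
      have hjle : nextB ia i ≤ ia.length := nextB_le ia (ia.length - i) i (by omega)
      rw [RB, filter_run_split ia i hi]
      by_cases hjn : nextB ia i = ia.length
      · rw [if_pos hjn]
        simp only [List.nil_append]
        rw [List.zip_cons_cons, List.zip_nil_right]
        simp only [List.foldl_cons, List.foldl_nil]
        rw [sortSlice_natCast sa i ia.length (by omega)]
        rw [go]
        rw [dif_pos hi, hjn]
        rw [go]
        rw [dif_neg (lt_irrefl _)]
      · rw [if_neg hjn]
        have hRB : (((nextB ia i : Nat) : Int) ::
            (PySem.List.pyRange ((nextB ia i + 1 : Nat) : Int) ((ia.length : Nat) : Int) 1).filter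
              (fun k => iget ia k ≠ iget ia (k - 1))) ++ [((ia.length : Nat) : Int)]
            = ((nextB ia i : Nat) : Int) :: RB ia (nextB ia i) := by
          rw [RB, List.cons_append]
        rw [hRB]
        rw [List.zip_cons_cons]
        simp only [List.foldl_cons]
        have hfold := ih (nextB ia i) (by omega) (by omega)
          (sortSlice sa (i : Int) ((nextB ia i : Nat) : Int))
        rw [hfold]
        rw [sortSlice_natCast sa i (nextB ia i) (by omega)]
        conv_rhs => rw [go]
        rw [dif_pos hi]
    · have hieq : i = ia.length := by omega
      subst hieq
      rw [RB, PySem.List.pyRange_one_eq_nil (by push_cast; omega)]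
      simp only [List.filter_nil, List.nil_append]
      rw [List.zip_cons_cons, List.zip_nil_right]
      simp only [List.foldl_cons, List.foldl_nil]
      rw [sortSlice_natCast sa ia.length ia.length (le_refl _),
        sortSliceN_degenerate sa ia.length ia.length (le_refl _) (by omega)]
      rw [go]
      rw [dif_neg (lt_irrefl _)]

theorem alt_eq_go (ia : List Int) (sa : List String) :
    string_sorting_alt ia sa = go ia sa 0 := by
  have h := foldPairs ia ia.length 0 (by omega) (by omega) sa
  rw [← h]
  simp only [string_sorting_alt, RB, PySem.List.len_eq, PySem.List.slice_from_one,
    List.cons_append, List.tail_cons]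
  norm_cast

theorem string_sorting_eq_alt (ia : List Int) (sa : List String) :
    string_sorting ia sa = string_sorting_alt ia sa := by
  rw [string_sorting_eq_composite, alt_eq_go]
  rcases Nat.eq_zero_or_pos ia.length with h0 | hpos
  · have hia : ia = [] := List.length_eq_zero_iff.mp h0
    subst hia
    have h1 : compositeA [] (List.length ([] : List Int) + 1) sa 0 1 = sa := by
      simp only [compositeA, List.length_nil, mainLoop]
      norm_num [PySem.List.len_eq]
    rw [h1, go]
    simp
  · have h := mainLoop_go ia (ia.length + 1) 0 1 sa (by omega) (by omega)
      (fun k hk1 hk2 => absurd hk1 (by omega)) (by omega)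
    simpa using h

-- ===== VERDICT (by name: the statement is the Claim_ definition above) =====
theorem string_sorting_spec : Claim_equal_string_sorting := by
  intro ia sa _
  unfold Spec_string_sorting
  exact string_sorting_eq_alt ia sa
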